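-- pv_equiv track=rewrite | github.com/phuayj/delta-lfit-2 | delta_lfit_2/logic.py | calc_minimality
-- ===== SOURCE A (Python) =====
-- def calc_minimality(curr_rules, rule_):
--     if prog_subsumes(curr_rules, rule_):
--         return False
--
--     for r in curr_rules:
--         if r[0] == rule_[0]:
--             if subsumes(rule_[1], r[1]):
--                 return False
--             r = set(r[1])
--             rule = set(rule_[1])
--             if len(r & rule) > 0:
--                 if len(r - rule) == 0 or len(rule - r) == 0:
--                     return False
--                 if len(r - rule) == len(rule - r):
--                     a = set([(1 if x[0] == 0 else 0, x[1]) for x in r - rule])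
--                     b = rule - r
--                     if len(a ^ b) == 0:
--                         return False
--     return True
--
-- def subsumes(rule_i, rule_j):
--     rule_i = set(rule_i)
--     rule_j = set(rule_j)
--     if rule_i.issubset(rule_j):
--         return True
--
--     return False
--
-- def prog_subsumes(p, rule):
--     for r in p:
--         if r[0] == rule[0]:
--             if subsumes(r[1], rule[1]):
--                 return True
--     return False
-- ===== SOURCE B (Python) =====
-- def _merge_split(xs, ys):
--     """xs, ys: strictly increasing lists. One two-pointer pass returning
--     (common elements, elements only in xs, elements only in ys)."""
--     i, j = 0, 0
--     inter, only_x, only_y = [], [], []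
--     while i < len(xs) and j < len(ys):
--         if xs[i] == ys[j]:
--             inter.append(xs[i]); i += 1; j += 1
--         elif xs[i] < ys[j]:
--             only_x.append(xs[i]); i += 1
--         else:
--             only_y.append(ys[j]); j += 1
--     only_x += xs[i:]
--     only_y += ys[j:]
--     return inter, only_x, only_y
--
--
-- def calc_minimality(curr_rules, rule_):
--     head = rule_[0]
--     new = sorted(set(rule_[1]))
--     for h, b in curr_rules:
--         if h != head:
--             continue
--         old = sorted(set(b))
--         inter, only_old, only_new = _merge_split(old, new)
--         if not only_old or not only_new:
--             # one body is contained in the other: not minimal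
--             return False
--         if inter and len(only_old) == len(only_new):
--             flipped = sorted({(1 if s == 0 else 0, v) for s, v in only_old})
--             if flipped == only_new:
--                 return False
--     return True
-- ===== Notes on version B (the rewrite author's own statement) =====
-- stated objective: alternative
-- what changed: Replaced A's hash-set machinery (prog_subsumes prepass, issubset tests, set intersection/differences and symmetric difference) by sorting each deduplicated body and computing intersection and both differences in one two-pointer merge pass, with the flip test done as equality of sorted lists.
import Mathlib
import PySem

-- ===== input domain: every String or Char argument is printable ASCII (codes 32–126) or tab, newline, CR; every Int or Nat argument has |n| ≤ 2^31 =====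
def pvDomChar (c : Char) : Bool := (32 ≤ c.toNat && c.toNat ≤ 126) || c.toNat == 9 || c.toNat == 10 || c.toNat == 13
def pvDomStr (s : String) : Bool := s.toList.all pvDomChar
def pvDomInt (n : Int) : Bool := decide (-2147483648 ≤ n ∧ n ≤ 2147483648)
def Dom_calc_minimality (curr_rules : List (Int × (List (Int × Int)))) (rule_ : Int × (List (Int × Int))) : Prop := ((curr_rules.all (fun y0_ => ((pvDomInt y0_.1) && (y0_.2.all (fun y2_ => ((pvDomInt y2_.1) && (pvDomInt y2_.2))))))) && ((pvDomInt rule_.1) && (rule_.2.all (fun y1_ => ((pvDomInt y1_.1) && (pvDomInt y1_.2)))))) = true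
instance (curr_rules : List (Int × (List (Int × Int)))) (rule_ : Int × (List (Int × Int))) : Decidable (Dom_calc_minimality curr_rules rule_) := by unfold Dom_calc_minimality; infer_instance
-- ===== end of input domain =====

-- B replaces A's hash-set operations by sorting each deduplicated body and computing
-- intersection and both differences in one two-pointer merge pass (objective: alternative).

-- ===== PORT A =====
def subsumesA (rule_i rule_j : List (Int × Int)) : Bool :=
  PySem.Set.issubset (PySem.Set.ofList rule_i) (PySem.Set.ofList rule_j)

def prog_subsumesA (p : List (Int × (List (Int × Int)))) (rule : Int × (List (Int × Int))) : Bool :=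
  p.any (fun r => r.1 == rule.1 && subsumesA r.2 rule.2)

def calcLoopA (rule_ : Int × (List (Int × Int))) : List (Int × (List (Int × Int))) → Bool
  | [] => true
  | r :: rest =>
    if r.1 == rule_.1 then
      if subsumesA rule_.2 r.2 then false
      else
        let rS : PySem.Set (Int × Int) := PySem.Set.ofList r.2
        let ruleS : PySem.Set (Int × Int) := PySem.Set.ofList rule_.2
        if 0 < (PySem.Set.inter rS ruleS).length then
          if (PySem.Set.diff rS ruleS).length == 0 || (PySem.Set.diff ruleS rS).length == 0 then false
          else if (PySem.Set.diff rS ruleS).length == (PySem.Set.diff ruleS rS).length then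
            let a : PySem.Set (Int × Int) :=
              PySem.Set.ofList ((PySem.Set.diff rS ruleS).map
                (fun x => ((if x.1 == 0 then (1 : Int) else 0), x.2)))
            let b : PySem.Set (Int × Int) := PySem.Set.diff ruleS rS
            if (PySem.Set.symmDiff a b).length == 0 then false
            else calcLoopA rule_ rest
          else calcLoopA rule_ rest
        else calcLoopA rule_ rest
    else calcLoopA rule_ rest

def calc_minimality (curr_rules : List (Int × (List (Int × Int)))) (rule_ : Int × (List (Int × Int))) : Bool :=
  if prog_subsumesA curr_rules rule_ then false
  else calcLoopA rule_ curr_rules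

-- ===== PORT B =====
-- Python tuple comparison xs[i] < ys[j] is lexicographic
def lexLtB (a b : Int × Int) : Bool := a.1 < b.1 || (a.1 == b.1 && a.2 < b.2)

-- _merge_split: one two-pointer pass over two strictly increasing lists
def mergeSplit : List (Int × Int) → List (Int × Int) →
    List (Int × Int) × List (Int × Int) × List (Int × Int)
  | [], ys => ([], [], ys)
  | x :: xs, [] => ([], x :: xs, [])
  | x :: xs, y :: ys =>
    if x == y then
      (x :: (mergeSplit xs ys).1, (mergeSplit xs ys).2.1, (mergeSplit xs ys).2.2)
    else if lexLtB x y then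
      ((mergeSplit xs (y :: ys)).1, x :: (mergeSplit xs (y :: ys)).2.1, (mergeSplit xs (y :: ys)).2.2)
    else
      ((mergeSplit (x :: xs) ys).1, (mergeSplit (x :: xs) ys).2.1, y :: (mergeSplit (x :: xs) ys).2.2)
termination_by xs ys => xs.length + ys.length

-- sorted(set(l)) — tuples sort lexicographically
def sortedSetB (l : List (Int × Int)) : List (Int × Int) :=
  PySem.List.sorted2 (PySem.Set.ofList l) Prod.fst Prod.snd

def flipB (x : Int × Int) : Int × Int := ((if x.1 == 0 then (1 : Int) else 0), x.2)

def altLoopB (head : Int) (nw : List (Int × Int)) : List (Int × (List (Int × Int))) → Bool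
  | [] => true
  | (h, b) :: rest =>
    if h != head then altLoopB head nw rest
    else
      let ms := mergeSplit (sortedSetB b) nw
      if ms.2.1.isEmpty || ms.2.2.isEmpty then false
      else if !ms.1.isEmpty && ms.2.1.length == ms.2.2.length &&
          (sortedSetB (ms.2.1.map flipB) == ms.2.2) then false
      else altLoopB head nw rest

def calc_minimality_alt (curr_rules : List (Int × (List (Int × Int)))) (rule_ : Int × (List (Int × Int))) : Bool :=
  altLoopB rule_.1 (sortedSetB rule_.2) curr_rules

-- ===== PRECONDITION & SPEC =====
def Spec_calc_minimality (curr_rules : List (Int × (List (Int × Int)))) (rule_ : Int × (List (Int × Int))) (out : Bool) : Prop := out = calc_minimality_alt curr_rules rule_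
instance (curr_rules : List (Int × (List (Int × Int)))) (rule_ : Int × (List (Int × Int))) (out : Bool) : Decidable (Spec_calc_minimality curr_rules rule_ out) := by unfold Spec_calc_minimality; infer_instance

-- ===== CLAIM (what is proved, stated in full; the proofs are below) =====
def Claim_equal_calc_minimality : Prop := ∀ (curr_rules : List (Int × (List (Int × Int)))) (rule_ : Int × (List (Int × Int))), Dom_calc_minimality curr_rules rule_ → Spec_calc_minimality curr_rules rule_ (calc_minimality curr_rules rule_)

-- ===== LEMMAS AND PROOFS =====

-- strict lexicographic order on pairs (what lexLtB decides, and sorted2's sort order)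
def lexLt (a b : Int × Int) : Prop := a.1 < b.1 ∨ (a.1 = b.1 ∧ a.2 < b.2)

theorem lexLtB_iff (a b : Int × Int) : lexLtB a b = true ↔ lexLt a b := by
  simp [lexLtB, lexLt]

theorem lexLt_asymm {a b : Int × Int} (h : lexLt a b) : ¬ lexLt b a := by
  rcases h with h | ⟨h1, h2⟩ <;> rintro (g | ⟨g1, g2⟩) <;> omega

theorem lexLt_irrefl (a : Int × Int) : ¬ lexLt a a := by
  rintro (h | ⟨h1, h2⟩) <;> omega

theorem lexLt_trans {a b c : Int × Int} (h1 : lexLt a b) (h2 : lexLt b c) : lexLt a c := by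
  simp only [lexLt] at h1 h2 ⊢
  omega

theorem lexLt_of_not_of_ne {a b : Int × Int} (h : ¬ lexLt b a) (hne : a ≠ b) : lexLt a b := by
  have h2 : ¬(a.1 = b.1 ∧ a.2 = b.2) := fun hc => hne (Prod.ext hc.1 hc.2)
  simp only [lexLt, not_or, not_and, not_lt] at h
  simp only [lexLt]
  omega

-- sorted2's internal comparator (definitienally sorted2's `lt` for keys fst, snd)
def lt2 (a b : Int × Int) : Bool := decide (a.1 < b.1) || (!decide (b.1 < a.1) && decide (a.2 < b.2))

theorem lt2_iff (a b : Int × Int) : lt2 a b = true ↔ lexLt a b := by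
  simp only [lt2, lexLt, Bool.or_eq_true, Bool.and_eq_true, Bool.not_eq_true',
    decide_eq_true_eq, decide_eq_false_iff_not, not_lt]
  constructor
  · rintro (h | ⟨h1, h2⟩)
    · exact Or.inl h
    · by_cases hf : a.1 < b.1
      · exact Or.inl hf
      · exact Or.inr ⟨by omega, h2⟩
  · rintro (h | ⟨h1, h2⟩)
    · exact Or.inl h
    · exact Or.inr ⟨by omega, h2⟩

def lexLe (a b : Int × Int) : Prop := ¬ lexLt b a

theorem pairwise_insertBy (x : Int × Int) (l : List (Int × Int)) (h : l.Pairwise lexLe) :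
    (PySem.List.insertBy lt2 x l).Pairwise lexLe := by
  induction l with
  | nil => exact List.pairwise_singleton lexLe x
  | cons y ys ih =>
    rw [List.pairwise_cons] at h
    rw [PySem.List.insertBy]
    by_cases hxy : lt2 x y = true
    · rw [if_pos hxy]
      have hlt : lexLt x y := (lt2_iff x y).1 hxy
      refine List.Pairwise.cons ?_ (List.Pairwise.cons h.1 h.2)
      intro z hz
      rcases List.mem_cons.1 hz with rfl | hz'
      · exact lexLt_asymm hlt
      · intro hc
        exact h.1 z hz' (lexLt_trans hc hlt)
    · rw [if_neg hxy]
      refine List.Pairwise.cons ?_ (ih h.2)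
      intro z hz
      rcases (PySem.List.mem_insertBy lt2 x z ys).1 hz with hzx | hz'
      · intro hc
        rw [hzx] at hc
        exact hxy ((lt2_iff x y).2 hc)
      · exact h.1 z hz'

theorem pairwise_foldl_insertBy (xs : List (Int × Int)) :
    ∀ acc : List (Int × Int), acc.Pairwise lexLe →
      (xs.foldl (fun acc x => PySem.List.insertBy lt2 x acc) acc).Pairwise lexLe := by
  induction xs with
  | nil => intro acc h; exact h
  | cons x xs ih =>
    intro acc h
    exact ih _ (pairwise_insertBy x acc h)

theorem sorted2_pairwise_le (s : List (Int × Int)) :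
    (PySem.List.sorted2 s Prod.fst Prod.snd false).Pairwise lexLe := by
  have heq : PySem.List.sorted2 s Prod.fst Prod.snd false
      = s.foldl (fun acc x => PySem.List.insertBy lt2 x acc) [] := rfl
  rw [heq]
  exact pairwise_foldl_insertBy s [] List.Pairwise.nil

theorem nodup_sortedSetB (l : List (Int × Int)) : (sortedSetB l).Nodup :=
  (PySem.List.sorted2_perm (PySem.Set.ofList l) Prod.fst Prod.snd false).nodup_iff.2
    (PySem.Set.nodup_ofList l)

theorem mem_sortedSetB {a : Int × Int} (l : List (Int × Int)) : a ∈ sortedSetB l ↔ a ∈ l := by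
  unfold sortedSetB
  rw [(PySem.List.sorted2_perm (PySem.Set.ofList l) Prod.fst Prod.snd false).mem_iff]
  exact PySem.Set.mem_ofList l a

theorem sortedSetB_strict (l : List (Int × Int)) : (sortedSetB l).Pairwise lexLt := by
  have h1 : (sortedSetB l).Pairwise lexLe := sorted2_pairwise_le (PySem.Set.ofList l)
  have h2 : (sortedSetB l).Pairwise (· ≠ ·) := nodup_sortedSetB l
  exact (h1.and h2).imp (fun {a b} ⟨hle, hne⟩ => lexLt_of_not_of_ne hle hne)

-- two strictly sorted lists with the same members are equal
theorem strict_sorted_ext : ∀ {l m : List (Int × Int)}, l.Pairwise lexLt → m.Pairwise lexLt →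
    (∀ a, a ∈ l ↔ a ∈ m) → l = m := by
  intro l
  induction l with
  | nil =>
    intro m _ _ hmem
    refine (List.eq_nil_iff_forall_not_mem.2 (fun a ha => ?_)).symm
    simpa using (hmem a).2 ha
  | cons x l ih =>
    intro m hl hm hmem
    cases m with
    | nil => simpa using (hmem x).1 List.mem_cons_self
    | cons y m =>
      rw [List.pairwise_cons] at hl hm
      have hxy : x = y := by
        by_contra hne
        have hx : x ∈ y :: m := (hmem x).1 List.mem_cons_self
        have hy : y ∈ x :: l := (hmem y).2 List.mem_cons_self
        rcases List.mem_cons.1 hx with h | h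
        · exact hne h
        · rcases List.mem_cons.1 hy with h' | h'
          · exact hne h'.symm
          · exact lexLt_asymm (hm.1 x h) (hl.1 y h')
      subst hxy
      congr 1
      refine ih hl.2 hm.2 (fun a => ⟨fun ha => ?_, fun ha => ?_⟩)
      · have hax : a ≠ x := fun h => lexLt_irrefl a (h ▸ hl.1 a ha)
        rcases List.mem_cons.1 ((hmem a).1 (List.mem_cons_of_mem x ha)) with h | h
        · exact absurd h hax
        · exact h
      · have hax : a ≠ x := fun h => lexLt_irrefl a (h ▸ hm.1 a ha)
        rcases List.mem_cons.1 ((hmem a).2 (List.mem_cons_of_mem x ha)) with h | h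
        · exact absurd h hax
        · exact h

-- a strict upper set: lexLt x y and y :: ys strictly sorted means x is in neither
theorem notmem_of_lexLt_head {x y : Int × Int} {ys : List (Int × Int)}
    (hy : (y :: ys).Pairwise lexLt) (h : lexLt x y) : x ∉ y :: ys := by
  intro hmem
  rcases List.mem_cons.1 hmem with rfl | hmem'
  · exact lexLt_irrefl x h
  · exact lexLt_irrefl x (lexLt_trans h ((List.pairwise_cons.1 hy).1 x hmem'))

-- the two-pointer merge computes, on strictly sorted inputs, exactly the
-- intersection and the two set differences (as filters)
theorem mergeSplit_eq : ∀ (xs ys : List (Int × Int)), xs.Pairwise lexLt → ys.Pairwise lexLt →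
    mergeSplit xs ys = (xs.filter (fun a => decide (a ∈ ys)),
                        xs.filter (fun a => !decide (a ∈ ys)),
                        ys.filter (fun a => !decide (a ∈ xs))) := by
  intro xs ys hx hy
  fun_induction mergeSplit xs ys with
  | case1 ys => simp
  | case2 x xs => simp
  | case3 x xs y ys heq ih =>
    rw [beq_iff_eq] at heq
    subst heq
    rw [List.pairwise_cons] at hx hy
    rw [ih hx.2 hy.2]
    have hxl : ∀ a ∈ xs, a ≠ x := fun a ha h => lexLt_irrefl a (h ▸ hx.1 a ha)
    have hyl : ∀ a ∈ ys, a ≠ x := fun a ha h => lexLt_irrefl a (h ▸ hy.1 a ha)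
    refine Prod.ext ?_ (Prod.ext ?_ ?_) <;> simp only
    · rw [List.filter_cons]
      simp only [List.mem_cons, decide_eq_true_eq]
      rw [if_pos (by simp)]
      congr 1
      refine List.filter_congr (fun a ha => ?_)
      simp [hxl a ha]
    · rw [List.filter_cons]
      rw [if_neg (by simp)]
      refine List.filter_congr (fun a ha => ?_)
      simp [hxl a ha]
    · rw [List.filter_cons]
      rw [if_neg (by simp)]
      refine List.filter_congr (fun a ha => ?_)
      simp [hyl a ha]
  | case4 x xs y ys hne hlt ih =>
    have hltP : lexLt x y := (lexLtB_iff x y).1 hlt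
    rw [List.pairwise_cons] at hx
    rw [ih hx.2 hy]
    have hxny : x ∉ y :: ys := notmem_of_lexLt_head hy hltP
    have hyl : ∀ a ∈ y :: ys, a ≠ x := fun a ha h =>
      hxny (h ▸ ha)
    refine Prod.ext ?_ (Prod.ext ?_ ?_) <;> simp only
    · rw [List.filter_cons, if_neg (by simp [hxny])]
    · rw [List.filter_cons, if_pos (by simp [hxny])]
    · refine List.filter_congr (fun a ha => ?_)
      simp [hyl a ha]
  | case5 x xs y ys hne hnlt ih =>
    have hxy : x ≠ y := by
      intro h; rw [h] at hne; simp at hne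
    have hltP : lexLt y x := by
      refine lexLt_of_not_of_ne ?_ hxy.symm
      intro hc
      rw [← lexLtB_iff] at hc
      simp [hc] at hnlt
    rw [List.pairwise_cons] at hy
    rw [ih hx hy.2]
    have hynx : y ∉ x :: xs := notmem_of_lexLt_head hx hltP
    have hxl : ∀ a ∈ x :: xs, a ≠ y := fun a ha h => hynx (h ▸ ha)
    refine Prod.ext ?_ (Prod.ext ?_ ?_) <;> simp only
    · refine List.filter_congr (fun a ha => ?_)
      simp [hxl a ha]
    · refine List.filter_congr (fun a ha => ?_)
      simp [hxl a ha]
    · rw [List.filter_cons, if_pos (by simp [hynx])]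

-- the per-rule condition A's second loop tests (the loop returns False ⇔ some rule satisfies it)
def condA2 (rule_ r : Int × (List (Int × Int))) : Bool :=
  r.1 == rule_.1 &&
    (subsumesA rule_.2 r.2 ||
      (decide (0 < (PySem.Set.inter (PySem.Set.ofList r.2) (PySem.Set.ofList rule_.2)).length) &&
        (((PySem.Set.diff (PySem.Set.ofList r.2) (PySem.Set.ofList rule_.2)).length == 0 ||
          (PySem.Set.diff (PySem.Set.ofList rule_.2) (PySem.Set.ofList r.2)).length == 0) ||
         ((PySem.Set.diff (PySem.Set.ofList r.2) (PySem.Set.ofList rule_.2)).length ==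
            (PySem.Set.diff (PySem.Set.ofList rule_.2) (PySem.Set.ofList r.2)).length &&
          (PySem.Set.symmDiff
            (PySem.Set.ofList ((PySem.Set.diff (PySem.Set.ofList r.2) (PySem.Set.ofList rule_.2)).map
              (fun x => ((if x.1 == 0 then (1 : Int) else 0), x.2))))
            (PySem.Set.diff (PySem.Set.ofList rule_.2) (PySem.Set.ofList r.2))).length == 0))))

-- the per-rule condition B tests
def condB (rule_ r : Int × (List (Int × Int))) : Bool :=
  !(r.1 != rule_.1) &&
    (let ms := mergeSplit (sortedSetB r.2) (sortedSetB rule_.2)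
     (ms.2.1.isEmpty || ms.2.2.isEmpty) ||
       (!ms.1.isEmpty && ms.2.1.length == ms.2.2.length &&
         (sortedSetB (ms.2.1.map flipB) == ms.2.2)))

theorem diff_len_zero (s t : List (Int × Int)) :
    ((PySem.Set.diff s t).length == 0) = PySem.Set.issubset s t := by
  rw [Bool.eq_iff_iff]
  simp [PySem.Set.diff, PySem.Set.issubset, PySem.Set.contains,
    List.length_eq_zero_iff, List.filter_eq_nil_iff]

theorem symmDiff_len_zero (a b : List (Int × Int)) :
    ((PySem.Set.symmDiff a b).length == 0) = PySem.Set.equal a b := by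
  rw [Bool.eq_iff_iff, PySem.Set.symmDiff, PySem.Set.equal]
  simp only [List.length_append, ← diff_len_zero]
  simp [Nat.add_eq_zero_iff]

theorem stepA (rule_ r : Int × (List (Int × Int))) (rest : List (Int × (List (Int × Int)))) :
    calcLoopA rule_ (r :: rest) = (!condA2 rule_ r && calcLoopA rule_ rest) := by
  cases h1 : (r.1 == rule_.1) <;>
  cases h2 : subsumesA rule_.2 r.2 <;>
  by_cases h3 : 0 < (PySem.Set.inter (PySem.Set.ofList r.2) (PySem.Set.ofList rule_.2)).length <;>
  cases h4 : ((PySem.Set.diff (PySem.Set.ofList r.2) (PySem.Set.ofList rule_.2)).length == 0 ||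
      (PySem.Set.diff (PySem.Set.ofList rule_.2) (PySem.Set.ofList r.2)).length == 0) <;>
  cases h5 : ((PySem.Set.diff (PySem.Set.ofList r.2) (PySem.Set.ofList rule_.2)).length ==
      (PySem.Set.diff (PySem.Set.ofList rule_.2) (PySem.Set.ofList r.2)).length) <;>
  cases h6 : ((PySem.Set.symmDiff
      (PySem.Set.ofList ((PySem.Set.diff (PySem.Set.ofList r.2) (PySem.Set.ofList rule_.2)).map
        (fun x => ((if x.1 == 0 then (1 : Int) else 0), x.2))))
      (PySem.Set.diff (PySem.Set.ofList rule_.2) (PySem.Set.ofList r.2))).length == 0) <;>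
  simp only [calcLoopA, condA2, h1, h2, h4, h5, h6] <;> simp [h3]

theorem stepB (rule_ : Int × (List (Int × Int))) (h : Int) (b : List (Int × Int))
    (rest : List (Int × (List (Int × Int)))) :
    altLoopB rule_.1 (sortedSetB rule_.2) ((h, b) :: rest) =
      (!condB rule_ (h, b) && altLoopB rule_.1 (sortedSetB rule_.2) rest) := by
  simp only [altLoopB, condB]
  cases h1 : (h != rule_.1) <;>
  cases h2 : ((mergeSplit (sortedSetB b) (sortedSetB rule_.2)).2.1.isEmpty ||
      (mergeSplit (sortedSetB b) (sortedSetB rule_.2)).2.2.isEmpty) <;>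
  cases h3 : (!(mergeSplit (sortedSetB b) (sortedSetB rule_.2)).1.isEmpty &&
      (mergeSplit (sortedSetB b) (sortedSetB rule_.2)).2.1.length ==
        (mergeSplit (sortedSetB b) (sortedSetB rule_.2)).2.2.length &&
      (sortedSetB ((mergeSplit (sortedSetB b) (sortedSetB rule_.2)).2.1.map flipB) ==
        (mergeSplit (sortedSetB b) (sortedSetB rule_.2)).2.2)) <;>
  simp

theorem loopA_eq (rule_ : Int × (List (Int × Int))) (l : List (Int × (List (Int × Int)))) :
    calcLoopA rule_ l = !l.any (condA2 rule_) := by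
  induction l with
  | nil => rfl
  | cons r rest ih => rw [stepA, ih, List.any_cons]; cases condA2 rule_ r <;> simp

theorem loopB_eq (rule_ : Int × (List (Int × Int))) (l : List (Int × (List (Int × Int)))) :
    altLoopB rule_.1 (sortedSetB rule_.2) l = !l.any (condB rule_) := by
  induction l with
  | nil => rfl
  | cons r rest ih =>
    obtain ⟨h, b⟩ := r
    rw [stepB, ih, List.any_cons]; cases condB rule_ (h, b) <;> simp

theorem length_eq_of_nodup_mem {l m : List (Int × Int)} (hl : l.Nodup) (hm : m.Nodup)
    (h : ∀ a, a ∈ l ↔ a ∈ m) : l.length = m.length :=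
  ((List.perm_ext_iff_of_nodup hl hm).2 h).length_eq

-- B's "only_old is empty" is A's issubset test
theorem onlyOld_spec (F N : List (Int × Int)) :
    ((sortedSetB F).filter (fun a => !decide (a ∈ sortedSetB N))).isEmpty =
      PySem.Set.issubset (PySem.Set.ofList F) (PySem.Set.ofList N) := by
  rw [Bool.eq_iff_iff]
  simp [List.isEmpty_iff, List.filter_eq_nil_iff, PySem.Set.issubset_iff,
    mem_sortedSetB, PySem.Set.mem_ofList]

-- B's "intersection nonempty" is A's positive-length test
theorem inter_spec (F N : List (Int × Int)) :
    (!((sortedSetB F).filter (fun a => decide (a ∈ sortedSetB N))).isEmpty) =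
      decide (0 < (PySem.Set.inter (PySem.Set.ofList F) (PySem.Set.ofList N)).length) := by
  rw [Bool.eq_iff_iff]
  simp [List.length_pos_iff_exists_mem, PySem.Set.mem_inter, mem_sortedSetB,
    PySem.Set.mem_ofList]

theorem mem_onlyOld {a : Int × Int} (F N : List (Int × Int)) :
    a ∈ (sortedSetB F).filter (fun a => !decide (a ∈ sortedSetB N)) ↔
      a ∈ PySem.Set.diff (PySem.Set.ofList F) (PySem.Set.ofList N) := by
  simp [List.mem_filter, PySem.Set.mem_diff, mem_sortedSetB, PySem.Set.mem_ofList]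

theorem nodup_onlyOld (F N : List (Int × Int)) :
    ((sortedSetB F).filter (fun a => !decide (a ∈ sortedSetB N))).Nodup :=
  (nodup_sortedSetB F).filter _

-- B's length of only_old is A's length of the set difference
theorem len_spec (F N : List (Int × Int)) :
    ((sortedSetB F).filter (fun a => !decide (a ∈ sortedSetB N))).length =
      (PySem.Set.diff (PySem.Set.ofList F) (PySem.Set.ofList N)).length :=
  length_eq_of_nodup_mem (nodup_onlyOld F N)
    (PySem.Set.nodup_diff _ _ (PySem.Set.nodup_ofList F))
    (fun _ => mem_onlyOld F N)

-- B's sorted-list comparison of the flipped difference is A's set equality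
theorem flip_spec (F N : List (Int × Int)) :
    ((sortedSetB (((sortedSetB F).filter (fun a => !decide (a ∈ sortedSetB N))).map flipB) ==
        (sortedSetB N).filter (fun a => !decide (a ∈ sortedSetB F)))) =
      PySem.Set.equal
        (PySem.Set.ofList ((PySem.Set.diff (PySem.Set.ofList F) (PySem.Set.ofList N)).map flipB))
        (PySem.Set.diff (PySem.Set.ofList N) (PySem.Set.ofList F)) := by
  rw [Bool.eq_iff_iff, beq_iff_eq, PySem.Set.equal_iff]
  constructor
  · intro h a
    have hm : a ∈ sortedSetB (((sortedSetB F).filter (fun a => !decide (a ∈ sortedSetB N))).map flipB) ↔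
        a ∈ (sortedSetB N).filter (fun a => !decide (a ∈ sortedSetB F)) := by rw [h]
    rw [mem_sortedSetB, mem_onlyOld] at hm
    rw [PySem.Set.mem_ofList]
    rw [List.mem_map] at hm ⊢
    constructor
    · rintro ⟨x, hx, rfl⟩
      exact hm.1 ⟨x, (mem_onlyOld F N).2 hx, rfl⟩
    · intro ha
      obtain ⟨x, hx, rfl⟩ := hm.2 ha
      exact ⟨x, (mem_onlyOld F N).1 hx, rfl⟩
  · intro h
    refine strict_sorted_ext (sortedSetB_strict _)
      (List.Pairwise.sublist List.filter_sublist (sortedSetB_strict N)) ?_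
    intro a
    rw [mem_sortedSetB, mem_onlyOld N F, ← h a, PySem.Set.mem_ofList]
    rw [List.mem_map, List.mem_map]
    constructor
    · rintro ⟨x, hx, rfl⟩
      exact ⟨x, (mem_onlyOld F N).1 hx, rfl⟩
    · rintro ⟨x, hx, rfl⟩
      exact ⟨x, (mem_onlyOld F N).2 hx, rfl⟩

-- the pointwise identity between A's per-rule tests and B's
theorem cond_point (rule_ r : Int × (List (Int × Int))) :
    ((r.1 == rule_.1 && subsumesA r.2 rule_.2) || condA2 rule_ r) = condB rule_ r := by
  unfold condA2 condB subsumesA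
  rw [mergeSplit_eq (sortedSetB r.2) (sortedSetB rule_.2)
    (sortedSetB_strict r.2) (sortedSetB_strict rule_.2)]
  simp only [bne, Bool.not_not,
    show (fun x : Int × Int => ((if x.1 == 0 then (1 : Int) else 0), x.2)) = flipB from rfl]
  rw [symmDiff_len_zero, diff_len_zero, diff_len_zero, ← onlyOld_spec r.2 rule_.2,
    ← onlyOld_spec rule_.2 r.2, ← inter_spec r.2 rule_.2, len_spec r.2 rule_.2,
    len_spec rule_.2 r.2, ← flip_spec r.2 rule_.2, ← len_spec r.2 rule_.2,
    ← len_spec rule_.2 r.2]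
  cases c1 : (r.1 == rule_.1) <;>
  cases c2 : ((sortedSetB r.2).filter (fun a => !decide (a ∈ sortedSetB rule_.2))).isEmpty <;>
  cases c3 : ((sortedSetB rule_.2).filter (fun a => !decide (a ∈ sortedSetB r.2))).isEmpty <;>
  cases c4 : (!((sortedSetB r.2).filter (fun a => decide (a ∈ sortedSetB rule_.2))).isEmpty) <;>
  cases c5 : (((sortedSetB r.2).filter (fun a => !decide (a ∈ sortedSetB rule_.2))).length ==
      ((sortedSetB rule_.2).filter (fun a => !decide (a ∈ sortedSetB r.2))).length) <;>
  cases c6 : (sortedSetB (((sortedSetB r.2).filter (fun a => !decide (a ∈ sortedSetB rule_.2))).map flipB) ==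
      (sortedSetB rule_.2).filter (fun a => !decide (a ∈ sortedSetB r.2))) <;>
  simp

theorem any_or_split (l : List (Int × (List (Int × Int)))) (f g : (Int × (List (Int × Int))) → Bool) :
    (l.any fun x => f x || g x) = (l.any f || l.any g) := by
  induction l with
  | nil => rfl
  | cons a l ih =>
    simp only [List.any_cons, ih]
    cases f a <;> cases g a <;> simp

-- ===== VERDICT (by name: the statement is the Claim_ definition above) =====
theorem calc_minimality_spec : Claim_equal_calc_minimality := by
  intro curr_rules rule_ _
  unfold Spec_calc_minimality calc_minimality calc_minimality_alt prog_subsumesA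
  rw [loopA_eq, loopB_eq,
    show condB rule_ = (fun r => ((r.1 == rule_.1 && subsumesA r.2 rule_.2) || condA2 rule_ r)) from
      (funext fun r => (cond_point rule_ r).symm),
    any_or_split]
  cases curr_rules.any (fun r => r.1 == rule_.1 && subsumesA r.2 rule_.2) <;>
    cases curr_rules.any (condA2 rule_) <;> simp
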